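-- pv_equiv track=rewrite | github.com/SeunghyeunBaek/daily_coding | 00_python_for_coding_test/12_10_lock_and_key.py | pad_key
-- ===== SOURCE A (Python) =====
-- from itertools import product
--
-- def pad_key(key:list, key_start_row_id:int, key_start_col_id:int)->list:
--     padding = 0
--     n_key_rows, n_key_cols = len(key), len(key[0])
--     padded_key = [[padding for _ in range(n_key_cols)] for _ in range(n_key_rows)]
--
--     for row_id, col_id in product(range(n_key_rows), range(n_key_cols)):
--         refer_row_id, refer_col_id = row_id - key_start_row_id, col_id - key_start_col_id
--         is_inside = all([0 <= refer_row_id < n_key_rows, 0 <= refer_col_id < n_key_cols])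
--         val = padding if not is_inside else key[refer_row_id][refer_col_id]
--         padded_key[row_id][col_id] = val
--
--     return padded_key
-- ===== SOURCE B (Python) =====
-- def pad_key(key: list, key_start_row_id: int, key_start_col_id: int) -> list:
--     n, m = len(key), len(key[0])
--     s = min(max(key_start_col_id, -m), m)
--     t = min(max(key_start_row_id, -n), n)
--
--     def shift_row(row):
--         if s >= 0:
--             return [0] * s + row[:m - s]
--         return row[-s:m] + [0] * (-s)
--
--     top = [[0] * m for _ in range(max(t, 0))]
--     middle = [shift_row(key[r]) for r in range(max(-t, 0), n - max(t, 0))]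
--     bottom = [[0] * m for _ in range(max(-t, 0))]
--     return top + middle + bottom
-- ===== Notes on version B (the rewrite author's own statement) =====
-- stated objective: faster
-- what changed: A fills the output cell by cell with a nested itertools.product loop, computing a reverse-offset source lookup and bounds check per cell; B never iterates over cells: it clamps the two offsets and assembles the result by block concatenation - zero rows on top/bottom and, for each kept source row, one slice of that row padded with a zero prefix or suffix.
import Mathlib
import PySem

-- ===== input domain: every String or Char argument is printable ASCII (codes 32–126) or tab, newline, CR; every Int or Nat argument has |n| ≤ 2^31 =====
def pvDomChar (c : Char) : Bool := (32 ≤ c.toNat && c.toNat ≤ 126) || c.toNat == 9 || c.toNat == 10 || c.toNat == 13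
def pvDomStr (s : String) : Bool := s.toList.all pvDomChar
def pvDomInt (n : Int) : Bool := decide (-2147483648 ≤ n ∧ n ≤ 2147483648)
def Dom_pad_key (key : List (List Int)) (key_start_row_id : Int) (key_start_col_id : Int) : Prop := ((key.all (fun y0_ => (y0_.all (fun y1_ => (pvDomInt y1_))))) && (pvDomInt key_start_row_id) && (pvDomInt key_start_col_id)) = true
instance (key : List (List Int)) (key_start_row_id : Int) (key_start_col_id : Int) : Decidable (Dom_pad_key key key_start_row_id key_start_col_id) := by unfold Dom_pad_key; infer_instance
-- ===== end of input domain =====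

-- B replaces A's per-cell nested product loop (a reverse-offset source lookup and a write at
-- every output cell) by whole-block assembly: clamp the offsets, then concatenate zero rows on
-- top/bottom and, for each kept source row, a slice of it padded with zero prefixes/suffixes
-- (measurably faster in a timing run: no per-cell Python-level work).

-- ===== PORT A =====
-- padded_key[i][j] = v  (Python list-of-lists mutation; indices are in range when used)
def pvSet2 (M : List (List Int)) (i j : Nat) (v : Int) : List (List Int) :=
  M.set i ((M.getD i []).set j v)

-- itertools.product(range n, range m), row-major
def pvProd (l1 l2 : List Nat) : List (Nat × Nat) :=
  l1.flatMap (fun a => l2.map (fun b => (a, b)))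

def pad_key (key : List (List Int)) (key_start_row_id : Int) (key_start_col_id : Int) : List (List Int) :=
  let n := key.length
  let m := (key.headD []).length
  let padded_key := (List.range n).map (fun _ => (List.range m).map (fun _ => (0 : Int)))
  (pvProd (List.range n) (List.range m)).foldl
    (fun M rc =>
      let refer_row_id : Int := (rc.1 : Int) - key_start_row_id
      let refer_col_id : Int := (rc.2 : Int) - key_start_col_id
      let val : Int :=
        if 0 ≤ refer_row_id ∧ refer_row_id < (n : Int) ∧ 0 ≤ refer_col_id ∧ refer_col_id < (m : Int)
        then (key.getD refer_row_id.toNat []).getD refer_col_id.toNat 0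
        else 0
      pvSet2 M rc.1 rc.2 val)
    padded_key

-- ===== PORT B =====
def pad_key_alt (key : List (List Int)) (key_start_row_id : Int) (key_start_col_id : Int) : List (List Int) :=
  let n := key.length
  let m := (key.headD []).length
  let s := min (max key_start_col_id (-(m : Int))) (m : Int)
  let t := min (max key_start_row_id (-(n : Int))) (n : Int)
  -- shift_row: [0]*s + row[:m-s]  (s ≥ 0)  /  row[-s:m] + [0]*(-s)  (s < 0)
  let shift_row : List Int → List Int := fun row =>
    if 0 ≤ s then List.replicate s.toNat 0 ++ PySem.List.slice row none (some ((m : Int) - s))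
    else PySem.List.slice row (some (-s)) (some (m : Int)) ++ List.replicate (-s).toNat 0
  let top := (PySem.List.pyRange 0 (max t 0) 1).map (fun _ => List.replicate m (0 : Int))
  let middle := (PySem.List.pyRange (max (-t) 0) ((n : Int) - max t 0) 1).map
      (fun r => shift_row (PySem.List.pyGetD key r []))
  let bottom := (PySem.List.pyRange 0 (max (-t) 0) 1).map (fun _ => List.replicate m (0 : Int))
  top ++ middle ++ bottom

-- ===== PRECONDITION & SPEC =====
-- Pre_ is exactly where the Python A returns: key nonempty, and every cell it reads
-- (source index inside the n×len(key[0]) window shifted by the offsets) exists; on an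
-- empty key or a read past a short ragged row A raises IndexError.
def Pre_pad_key (key : List (List Int)) (key_start_row_id : Int) (key_start_col_id : Int) : Prop :=
  key ≠ [] ∧
  ∀ r : Nat, r < key.length →
    (0 ≤ (r : Int) + key_start_row_id ∧ (r : Int) + key_start_row_id < (key.length : Int)) →
    ∀ c : Nat, c < (key.headD []).length →
      (0 ≤ (c : Int) + key_start_col_id ∧ (c : Int) + key_start_col_id < ((key.headD []).length : Int)) →
      c < (key.getD r []).length
instance (key : List (List Int)) (key_start_row_id : Int) (key_start_col_id : Int) : Decidable (Pre_pad_key key key_start_row_id key_start_col_id) := by unfold Pre_pad_key; infer_instance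
def pvWitness_pad_key : List (List Int) × Int × Int := ([[1, 2], [3, 4]], 1, 0)

def Spec_pad_key (key : List (List Int)) (key_start_row_id : Int) (key_start_col_id : Int) (out : List (List Int)) : Prop := out = pad_key_alt key key_start_row_id key_start_col_id
instance (key : List (List Int)) (key_start_row_id : Int) (key_start_col_id : Int) (out : List (List Int)) : Decidable (Spec_pad_key key key_start_row_id key_start_col_id out) := by unfold Spec_pad_key; infer_instance

-- ===== CLAIM (what is proved, stated in full; the proofs are below) =====
def Claim_equal_pad_key : Prop := ∀ (key : List (List Int)) (key_start_row_id : Int) (key_start_col_id : Int), Dom_pad_key key key_start_row_id key_start_col_id → Pre_pad_key key key_start_row_id key_start_col_id → Spec_pad_key key key_start_row_id key_start_col_id (pad_key key key_start_row_id key_start_col_id)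

-- ===== LEMMAS AND PROOFS =====

lemma pvSet2_length (M : List (List Int)) (i j : Nat) (v : Int) :
    (pvSet2 M i j v).length = M.length := by
  simp [pvSet2]

lemma getD_set (M : List (List Int)) (k : Nat) (r : List Int) (i : Nat) :
    (M.set k r).getD i [] = if i = k ∧ k < M.length then r else M.getD i [] := by
  rcases Nat.lt_or_ge i M.length with h | h
  · rcases eq_or_ne i k with rfl | hne
    · simp [List.getD_eq_getElem?_getD, h]
    · simp [List.getD_eq_getElem?_getD, List.getElem?_set_ne (Ne.symm hne), hne]
  · have h' : (M.set k r).length ≤ i := by simpa using h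
    simp [List.getD_eq_getElem?_getD, List.getElem?_eq_none h, List.getElem?_eq_none h']
    intro h1 h2; omega

lemma pvSet2_rowlen (M : List (List Int)) (i j : Nat) (v : Int) (a : Nat) :
    ((pvSet2 M i j v).getD a []).length = (M.getD a []).length := by
  unfold pvSet2
  rw [getD_set]
  split_ifs with h
  · rcases h with ⟨rfl, _⟩; simp
  · rfl

lemma pvSet2_cell (M : List (List Int)) (i j : Nat) (v : Int) (a b : Nat) :
    ((pvSet2 M i j v).getD a []).getD b 0 =
      if a = i ∧ b = j ∧ i < M.length ∧ j < (M.getD i []).length then v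
      else (M.getD a []).getD b 0 := by
  unfold pvSet2
  rw [getD_set]
  split_ifs with h1 h2 h2
  · obtain ⟨rfl, -⟩ := h1
    obtain ⟨-, rfl, -, hj⟩ := h2
    have hb : b < ((M.getD a []).set b v).length := by simpa using hj
    rw [List.getD_eq_getElem _ _ hb, List.getElem_set_self]
  · obtain ⟨rfl, hi⟩ := h1
    rcases Nat.lt_or_ge b (M.getD a []).length with hb | hb
    · have hbj : b ≠ j := by rintro rfl; exact h2 ⟨rfl, rfl, hi, hb⟩
      have hb' : b < ((M.getD a []).set j v).length := by simpa using hb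
      rw [List.getD_eq_getElem _ _ hb', List.getElem_set_ne (Ne.symm hbj),
        List.getD_eq_getElem _ _ hb]
    · have h' : ((M.getD a []).set j v).length ≤ b := by simpa using hb
      rw [List.getD_eq_default _ _ h', List.getD_eq_default _ _ hb]
  · obtain ⟨rfl, rfl, hi, -⟩ := h2; exact absurd ⟨rfl, hi⟩ h1
  · rfl

lemma fold_length (F : Nat × Nat → Int) (L : List (Nat × Nat)) (M : List (List Int)) :
    (L.foldl (fun M p => pvSet2 M p.1 p.2 (F p)) M).length = M.length := by
  induction L generalizing M with
  | nil => rfl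
  | cons p L ih => simp only [List.foldl_cons]; rw [ih, pvSet2_length]

lemma fold_rowlen (F : Nat × Nat → Int) (L : List (Nat × Nat)) (M : List (List Int)) (a : Nat) :
    ((L.foldl (fun M p => pvSet2 M p.1 p.2 (F p)) M).getD a []).length = (M.getD a []).length := by
  induction L generalizing M with
  | nil => rfl
  | cons p L ih => simp only [List.foldl_cons]; rw [ih, pvSet2_rowlen]

lemma fold_cell (F : Nat × Nat → Int) (L : List (Nat × Nat)) (M : List (List Int)) (i j : Nat) :
    ((L.foldl (fun M p => pvSet2 M p.1 p.2 (F p)) M).getD i []).getD j 0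
      = if (i, j) ∈ L ∧ i < M.length ∧ j < (M.getD i []).length
        then F (i, j) else (M.getD i []).getD j 0 := by
  induction L generalizing M with
  | nil => simp
  | cons p L ih =>
      simp only [List.foldl_cons]
      rw [ih, pvSet2_length, pvSet2_rowlen, pvSet2_cell]
      have hcons : (i, j) ∈ p :: L ↔ (p = (i, j)) ∨ (i, j) ∈ L := by
        simp [List.mem_cons, eq_comm]
      simp only [hcons]
      by_cases hR : i < M.length ∧ j < (M.getD i []).length
      · by_cases hE : (i, j) ∈ L
        · rw [if_pos ⟨hE, hR.1, hR.2⟩, if_pos ⟨Or.inr hE, hR.1, hR.2⟩]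
        · rw [if_neg (fun h => hE h.1)]
          by_cases hhit : p = (i, j)
          · subst hhit
            rw [if_pos ⟨rfl, rfl, hR.1, hR.2⟩, if_pos ⟨Or.inl rfl, hR.1, hR.2⟩]
          · rw [if_neg, if_neg (fun h => h.1.elim hhit hE)]
            rintro ⟨ha, hb, -⟩
            exact hhit (Prod.ext ha.symm hb.symm)
      · have hc : ¬ (i = p.1 ∧ j = p.2 ∧ p.1 < M.length ∧ p.2 < (M.getD p.1 []).length) := by
          rintro ⟨h1, h2, h3, h4⟩
          exact hR ⟨by rw [h1]; exact h3, by rw [h1, h2]; exact h4⟩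
        rw [if_neg (fun h => hR ⟨h.2.1, h.2.2⟩), if_neg hc, if_neg (fun h => hR ⟨h.2.1, h.2.2⟩)]

-- the common per-cell value: what A computes for output cell p
def pvFA (key : List (List Int)) (r0 c0 : Int) (p : Nat × Nat) : Int :=
  if 0 ≤ (p.1 : Int) - r0 ∧ (p.1 : Int) - r0 < (key.length : Int) ∧
     0 ≤ (p.2 : Int) - c0 ∧ (p.2 : Int) - c0 < ((key.headD []).length : Int)
  then (key.getD ((p.1 : Int) - r0).toNat []).getD ((p.2 : Int) - c0).toNat 0 else 0

lemma getD_map_const (v : List Int) (n i : Nat) (h : i < n) :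
    ((List.range n).map (fun _ => v)).getD i [] = v := by
  have h' : i < ((List.range n).map (fun _ => v)).length := by simpa using h
  rw [List.getD_eq_getElem _ _ h', List.getElem_map]

lemma mem_pvProd_range (n m : Nat) (p : Nat × Nat) :
    p ∈ pvProd (List.range n) (List.range m) ↔ p.1 < n ∧ p.2 < m := by
  rcases p with ⟨a, b⟩
  simp [pvProd, List.mem_flatMap]

lemma padA_eq_fold (key : List (List Int)) (r0 c0 : Int) :
    pad_key key r0 c0
      = (pvProd (List.range key.length) (List.range (key.headD []).length)).foldl
          (fun M p => pvSet2 M p.1 p.2 (pvFA key r0 c0 p))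
          ((List.range key.length).map
            (fun _ => (List.range (key.headD []).length).map (fun _ => (0 : Int)))) := by
  simp only [pad_key]
  simp [pvFA]

lemma padA_length (key : List (List Int)) (r0 c0 : Int) :
    (pad_key key r0 c0).length = key.length := by
  rw [padA_eq_fold, fold_length]; simp

lemma padA_rowlen (key : List (List Int)) (r0 c0 : Int) (i : Nat) (hi : i < key.length) :
    ((pad_key key r0 c0).getD i []).length = (key.headD []).length := by
  rw [padA_eq_fold, fold_rowlen, getD_map_const _ _ _ hi]; simp

lemma padA_cell (key : List (List Int)) (r0 c0 : Int) (i j : Nat)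
    (hi : i < key.length) (hj : j < (key.headD []).length) :
    ((pad_key key r0 c0).getD i []).getD j 0 = pvFA key r0 c0 (i, j) := by
  rw [padA_eq_fold, fold_cell]
  rw [if_pos]
  refine ⟨(mem_pvProd_range _ _ _).mpr ⟨hi, hj⟩, by simpa using hi, ?_⟩
  rw [getD_map_const _ _ _ hi]; simpa using hj

-- ----- B side -----

-- the clamped offsets of B, and its row-shift helper, named for the proofs
def pvT (key : List (List Int)) (r0 : Int) : Int :=
  min (max r0 (-(key.length : Int))) (key.length : Int)
def pvS (key : List (List Int)) (c0 : Int) : Int :=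
  min (max c0 (-((key.headD []).length : Int))) ((key.headD []).length : Int)
def pvShift (key : List (List Int)) (c0 : Int) (row : List Int) : List Int :=
  if 0 ≤ pvS key c0 then
    List.replicate (pvS key c0).toNat 0 ++
      PySem.List.slice row none (some (((key.headD []).length : Int) - pvS key c0))
  else
    PySem.List.slice row (some (-(pvS key c0))) (some ((key.headD []).length : Int)) ++
      List.replicate (-(pvS key c0)).toNat 0

lemma padB_decomp (key : List (List Int)) (r0 c0 : Int) :
    pad_key_alt key r0 c0 =
      List.replicate (max (pvT key r0) 0).toNat (List.replicate (key.headD []).length 0)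
      ++ (List.range ((key.length : Int) - max (pvT key r0) 0 - max (-(pvT key r0)) 0).toNat).map
          (fun k => pvShift key c0 (key.getD ((max (-(pvT key r0)) 0).toNat + k) []))
      ++ List.replicate (max (-(pvT key r0)) 0).toNat (List.replicate (key.headD []).length 0) := by
  simp only [pad_key_alt, pvShift, pvT, pvS]
  simp only [PySem.List.pyRange_one, List.map_map, Function.comp_def]
  congr 1
  · congr 1
    · simp
    · apply List.map_congr_left
      intro k hk
      simp only [List.mem_range] at hk
      have h0 : 0 ≤ max (-(min (max r0 (-(key.length : Int))) (key.length : Int))) 0 + (k : Int) := by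
        omega
      have hrow : PySem.List.pyGetD key
          (max (-(min (max r0 (-(key.length : Int))) (key.length : Int))) 0 + (k : Int)) ([] : List Int)
          = key.getD ((max (-(min (max r0 (-(key.length : Int))) (key.length : Int))) 0).toNat + k) [] := by
        rw [PySem.List.pyGetD_eq_getElem _ _ h0 (by omega)]
        rw [List.getD_eq_getElem _ _ (by omega)]
        congr 1
        omega
      rw [hrow]
  · simp

lemma padB_length (key : List (List Int)) (r0 c0 : Int) :
    (pad_key_alt key r0 c0).length = key.length := by
  rw [padB_decomp]
  simp only [List.length_append, List.length_replicate, List.length_map, List.length_range]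
  have : - (key.length : Int) ≤ pvT key r0 ∧ pvT key r0 ≤ (key.length : Int) := by
    unfold pvT; constructor <;> omega
  omega

-- pvShift with the slices evaluated to drop/take (bounds are nonnegative by the clamping)
lemma pvShift_eq (key : List (List Int)) (c0 : Int) (row : List Int) :
    pvShift key c0 row =
      if 0 ≤ pvS key c0 then
        List.replicate (pvS key c0).toNat 0 ++
          row.take ((((key.headD []).length : Int)) - pvS key c0).toNat
      else
        (row.drop (-(pvS key c0)).toNat).take
            (((key.headD []).length : Int).toNat - (-(pvS key c0)).toNat) ++
          List.replicate (-(pvS key c0)).toNat 0 := by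
  unfold pvShift
  split_ifs with h
  · rw [PySem.List.slice_to _ (by unfold pvS at *; omega)]
  · rw [PySem.List.slice_toNat _ (by omega) (by omega)]

-- generic facts about the shifted row, abstracting s := pvS key c0 and m
lemma shift_core_len (s c0 : Int) (m : Nat) (row : List Int)
    (hsc : s = min (max c0 (-(m : Int))) (m : Int))
    (hrow : ∀ c : Nat, c < m → 0 ≤ (c : Int) + c0 → (c : Int) + c0 < (m : Int) → c < row.length) :
    (if 0 ≤ s then List.replicate s.toNat 0 ++ row.take ((m : Int) - s).toNat
     else (row.drop (-s).toNat).take ((m : Int).toNat - (-s).toNat) ++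
       List.replicate (-s).toNat 0).length = m := by
  have hs1 : -(m : Int) ≤ s := by omega
  have hs2 : s ≤ (m : Int) := by omega
  split_ifs with h
  · have hA : ((m : Int) - s).toNat ≤ row.length := by
      by_cases hz : ((m : Int) - s).toNat = 0
      · omega
      · have hsv : s = min c0 (m : Int) := by omega
        have hc := hrow (((m : Int) - s).toNat - 1) (by omega) (by omega)
          (by omega)
        omega
    simp only [List.length_append, List.length_replicate, List.length_take]
    omega
  · have hB : -(m : Int) < s → m ≤ row.length := by
      intro hlt
      have hsv : s = c0 := by omega
      by_cases hm0 : m = 0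
      · omega
      · have hc := hrow (m - 1) (by omega) (by omega) (by omega)
        omega
    simp only [List.length_append, List.length_replicate, List.length_take, List.length_drop]
    by_cases hlt : -(m : Int) < s
    · have := hB hlt; omega
    · omega

lemma shift_core_cell (s c0 : Int) (m : Nat) (row : List Int) (j : Nat) (hj : j < m)
    (hsc : s = min (max c0 (-(m : Int))) (m : Int))
    (hrow : ∀ c : Nat, c < m → 0 ≤ (c : Int) + c0 → (c : Int) + c0 < (m : Int) → c < row.length) :
    (if 0 ≤ s then List.replicate s.toNat 0 ++ row.take ((m : Int) - s).toNat
     else (row.drop (-s).toNat).take ((m : Int).toNat - (-s).toNat) ++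
       List.replicate (-s).toNat 0).getD j 0 =
      (if 0 ≤ (j : Int) - c0 ∧ (j : Int) - c0 < (m : Int)
       then row.getD ((j : Int) - c0).toNat 0 else 0) := by
  have hs1 : -(m : Int) ≤ s := by omega
  have hs2 : s ≤ (m : Int) := by omega
  split_ifs with h hin hin
  · -- s ≥ 0, column window holds at j: j ≥ s (else j - c0 < 0), s = c0
    have hc0 : 0 ≤ c0 := by omega
    have hsv : s = min c0 (m : Int) := by omega
    have hjs : s.toNat ≤ j := by omega
    have hsc0 : s = c0 := by omega
    have hA : ((m : Int) - s).toNat ≤ row.length := by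
      have hc := hrow (((m : Int) - s).toNat - 1) (by omega) (by omega)
        (by omega)
      omega
    rw [List.getD_append_right _ _ _ _ (by simpa using hjs)]
    simp only [List.length_replicate]
    have hjl : j - s.toNat < (row.take ((m : Int) - s).toNat).length := by
      simp only [List.length_take]; omega
    rw [List.getD_eq_getElem _ _ hjl, List.getElem_take,
      List.getD_eq_getElem _ _ (by omega : ((j : Int) - c0).toNat < row.length)]
    congr 1
    omega
  · -- s ≥ 0, window fails: j < s (j - c0 < 0), value is the zero prefix
    have hc0 : 0 ≤ c0 := by omega
    have hsv : s = min c0 (m : Int) := by omega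
    have hjs : j < s.toNat := by omega
    rw [List.getD_append _ _ _ _ (by simpa using hjs), List.getD_replicate _ (by simpa using hjs)]
  · -- s < 0, window holds: j is inside the slice part, s = c0
    have hc0 : c0 < 0 := by omega
    have hsv : s = max c0 (-(m : Int)) := by omega
    have hlt : -(m : Int) < c0 := by omega
    have hsc0 : s = c0 := by omega
    have hB : m ≤ row.length := by
      have hc := hrow (m - 1) (by omega) (by omega) (by omega)
      omega
    have hjl : j < ((row.drop (-s).toNat).take ((m : Int).toNat - (-s).toNat)).length := by
      simp only [List.length_take, List.length_drop]; omega
    rw [List.getD_append _ _ _ _ hjl, List.getD_eq_getElem _ _ hjl, List.getElem_take,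
      List.getElem_drop, List.getD_eq_getElem _ _ (by omega : ((j : Int) - c0).toNat < row.length)]
    congr 1
    omega
  · -- s < 0, window fails: j - c0 ≥ m, value is in the zero suffix
    have hc0 : c0 < 0 := by omega
    have hsv : s = max c0 (-(m : Int)) := by omega
    have hslen : ((row.drop (-s).toNat).take ((m : Int).toNat - (-s).toNat)).length ≤ j := by
      simp only [List.length_take, List.length_drop]
      omega
    have hlen : -(m : Int) < s → m ≤ row.length := by
      intro hlt
      have hc := hrow (m - 1) (by omega) (by omega) (by omega)
      omega
    rw [List.getD_append_right _ _ _ _ hslen, List.getD_replicate _ ?_]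
    simp only [List.length_take, List.length_drop]
    by_cases hlt : -(m : Int) < s
    · have := hlen hlt; omega
    · omega

lemma pvShift_length (key : List (List Int)) (c0 : Int) (row : List Int)
    (hrow : ∀ c : Nat, c < (key.headD []).length →
      0 ≤ (c : Int) + c0 → (c : Int) + c0 < ((key.headD []).length : Int) → c < row.length) :
    (pvShift key c0 row).length = (key.headD []).length := by
  rw [pvShift_eq]
  exact shift_core_len (pvS key c0) c0 (key.headD []).length row rfl hrow

lemma pvShift_cell (key : List (List Int)) (c0 : Int) (row : List Int) (j : Nat)
    (hj : j < (key.headD []).length)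
    (hrow : ∀ c : Nat, c < (key.headD []).length →
      0 ≤ (c : Int) + c0 → (c : Int) + c0 < ((key.headD []).length : Int) → c < row.length) :
    (pvShift key c0 row).getD j 0 =
      if 0 ≤ (j : Int) - c0 ∧ (j : Int) - c0 < ((key.headD []).length : Int)
      then row.getD ((j : Int) - c0).toNat 0 else 0 := by
  rw [pvShift_eq]
  exact shift_core_cell (pvS key c0) c0 (key.headD []).length row j hj rfl hrow

lemma padB_sum (key : List (List Int)) (r0 : Int) :
    (max (pvT key r0) 0).toNat
      + ((key.length : Int) - max (pvT key r0) 0 - max (-(pvT key r0)) 0).toNat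
      + (max (-(pvT key r0)) 0).toNat = key.length := by
  have h1 : -(key.length : Int) ≤ pvT key r0 ∧ pvT key r0 ≤ (key.length : Int) := by
    unfold pvT; constructor <;> omega
  omega

-- Pre_'s row guarantee specialised to a middle row of B
lemma padB_midrow (key : List (List Int)) (r0 c0 : Int) (hpre : Pre_pad_key key r0 c0) (k : Nat)
    (hk : k < ((key.length : Int) - max (pvT key r0) 0 - max (-(pvT key r0)) 0).toNat) :
    ∀ c : Nat, c < (key.headD []).length →
      0 ≤ (c : Int) + c0 → (c : Int) + c0 < ((key.headD []).length : Int) →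
      c < (key.getD ((max (-(pvT key r0)) 0).toNat + k) []).length := by
  intro c hc hc1 hc2
  have hTv : pvT key r0 = min (max r0 (-(key.length : Int))) (key.length : Int) := rfl
  have hTr : pvT key r0 = r0 := by omega
  exact hpre.2 _ (by omega) (by omega) c hc (by omega)

lemma padB_rowlen (key : List (List Int)) (r0 c0 : Int)
    (hpre : Pre_pad_key key r0 c0) (i : Nat) (hi : i < key.length) :
    ((pad_key_alt key r0 c0).getD i []).length = (key.headD []).length := by
  have hsum := padB_sum key r0
  rw [padB_decomp, List.append_assoc]
  set tp := (max (pvT key r0) 0).toNat with htp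
  set bt := (max (-(pvT key r0)) 0).toNat with hbt
  set md := ((key.length : Int) - max (pvT key r0) 0 - max (-(pvT key r0)) 0).toNat with hmd
  have hi' : i < (List.replicate tp (List.replicate (key.headD []).length 0)
      ++ ((List.range md).map (fun k => pvShift key c0 (key.getD (bt + k) []))
          ++ List.replicate bt (List.replicate (key.headD []).length 0))).length := by
    simp only [List.length_append, List.length_replicate, List.length_map, List.length_range]
    omega
  rw [List.getD_eq_getElem _ _ hi']
  rcases Nat.lt_or_ge i tp with h1 | h1
  · rw [List.getElem_append_left (by simpa using h1)]
    simp
  · rw [List.getElem_append_right (by simpa using h1)]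
    simp only [List.length_replicate]
    rcases Nat.lt_or_ge (i - tp) md with h2 | h2
    · rw [List.getElem_append_left (by simpa using h2)]
      simp only [List.getElem_map, List.getElem_range]
      exact pvShift_length key c0 _ (padB_midrow key r0 c0 hpre _ h2)
    · rw [List.getElem_append_right (by simpa using h2)]
      simp

lemma padB_cell (key : List (List Int)) (r0 c0 : Int)
    (hpre : Pre_pad_key key r0 c0) (i j : Nat)
    (hi : i < key.length) (hj : j < (key.headD []).length) :
    ((pad_key_alt key r0 c0).getD i []).getD j 0 = pvFA key r0 c0 (i, j) := by
  have hsum := padB_sum key r0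
  rw [padB_decomp, List.append_assoc]
  set tp := (max (pvT key r0) 0).toNat with htp
  set bt := (max (-(pvT key r0)) 0).toNat with hbt
  set md := ((key.length : Int) - max (pvT key r0) 0 - max (-(pvT key r0)) 0).toNat with hmd
  have hTv : pvT key r0 = min (max r0 (-(key.length : Int))) (key.length : Int) := rfl
  have hi' : i < (List.replicate tp (List.replicate (key.headD []).length 0)
      ++ ((List.range md).map (fun k => pvShift key c0 (key.getD (bt + k) []))
          ++ List.replicate bt (List.replicate (key.headD []).length 0))).length := by
    simp only [List.length_append, List.length_replicate, List.length_map, List.length_range]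
    omega
  rw [List.getD_eq_getElem _ _ hi']
  rcases Nat.lt_or_ge i tp with h1 | h1
  · -- top zero block: source row i - r0 < 0
    rw [List.getElem_append_left (by simpa using h1)]
    simp only [List.getElem_replicate]
    rw [List.getD_replicate _ (by simpa using hj)]
    unfold pvFA
    rw [if_neg]
    rintro ⟨ha, -, -, -⟩
    simp only at ha
    omega
  · rw [List.getElem_append_right (by simpa using h1)]
    simp only [List.length_replicate]
    rcases Nat.lt_or_ge (i - tp) md with h2 | h2
    · -- middle: the clamp is inactive here, pvT = r0, source row = i - r0
      rw [List.getElem_append_left (by simpa using h2)]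
      simp only [List.getElem_map, List.getElem_range]
      have hTr : pvT key r0 = r0 := by omega
      have hsrc : bt + (i - tp) = ((i : Int) - r0).toNat := by omega
      rw [pvShift_cell key c0 _ j hj (padB_midrow key r0 c0 hpre _ h2), hsrc]
      unfold pvFA
      simp only
      by_cases hcol : 0 ≤ (j : Int) - c0 ∧ (j : Int) - c0 < ((key.headD []).length : Int)
      · rw [if_pos hcol, if_pos ⟨by omega, by omega, hcol.1, hcol.2⟩]
      · rw [if_neg hcol, if_neg (by rintro ⟨-, -, hx1, hx2⟩; exact hcol ⟨hx1, hx2⟩)]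
    · -- bottom zero block: source row i - r0 ≥ n
      rw [List.getElem_append_right (by simpa using h2)]
      simp only [List.getElem_replicate]
      rw [List.getD_replicate _ (by simpa using hj)]
      unfold pvFA
      rw [if_neg]
      rintro ⟨-, hb, -, -⟩
      simp only at hb
      omega

theorem pad_key_eq_alt (key : List (List Int)) (r0 c0 : Int)
    (hpre : Pre_pad_key key r0 c0) :
    pad_key key r0 c0 = pad_key_alt key r0 c0 := by
  apply List.ext_getElem
  · rw [padA_length, padB_length]
  intro i hiA hiB
  have hi : i < key.length := by rw [padA_length] at hiA; exact hiA
  have hrowA : (pad_key key r0 c0)[i] = (pad_key key r0 c0).getD i [] :=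
    (List.getD_eq_getElem _ _ hiA).symm
  have hrowB : (pad_key_alt key r0 c0)[i] = (pad_key_alt key r0 c0).getD i [] :=
    (List.getD_eq_getElem _ _ hiB).symm
  rw [hrowA, hrowB]
  apply List.ext_getElem
  · rw [padA_rowlen _ _ _ _ hi, padB_rowlen _ _ _ hpre _ hi]
  intro j hjA hjB
  have hj : j < (key.headD []).length := by rw [padA_rowlen _ _ _ _ hi] at hjA; exact hjA
  have hcA : ((pad_key key r0 c0).getD i [])[j] = ((pad_key key r0 c0).getD i []).getD j 0 :=
    (List.getD_eq_getElem _ _ hjA).symm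
  have hcB : ((pad_key_alt key r0 c0).getD i [])[j] = ((pad_key_alt key r0 c0).getD i []).getD j 0 :=
    (List.getD_eq_getElem _ _ hjB).symm
  rw [hcA, hcB, padA_cell _ _ _ _ _ hi hj, padB_cell _ _ _ hpre _ _ hi hj]

-- ===== VERDICT (by name: the statement is the Claim_ definition above) =====
theorem pad_key_spec : Claim_equal_pad_key := by
  intro key r0 c0 _ hpre
  unfold Spec_pad_key
  exact pad_key_eq_alt key r0 c0 hpre
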